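-- pv_equiv track=rewrite | github.com/josephhughes/V-gTK | bash-wf/scripts/FeatureCalculator.py | gap_index
-- ===== SOURCE A (Python) =====
-- def gap_index(sequence):
-- 	gap_indices = []
-- 	current_gap = []
--
-- 	for index, char in enumerate(sequence, start=1):
-- 		if char == '-':
-- 			if not current_gap:
-- 				current_gap.append(index)
-- 		else:
-- 			if current_gap:
-- 				current_gap.append(index - 1)
-- 				gap_indices.append(current_gap)
-- 				current_gap = []
--
-- 	if current_gap:
-- 		current_gap.append(len(sequence))
-- 		gap_indices.append(current_gap)
--
-- 	return gap_indices
-- ===== SOURCE B (Python) =====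
-- def gap_index(sequence):
--     # Run-based scan: split the sequence into maximal runs of equal characters
--     # and emit a [start, end] (1-indexed, inclusive) range for each '-' run.
--     result = []
--     n = len(sequence)
--     i = 0
--     while i < n:
--         j = i + 1
--         while j < n and sequence[j] == sequence[i]:
--             j += 1
--         if sequence[i] == '-':
--             result.append([i + 1, j])
--         i = j
--     return result
-- ===== Notes on version B (the rewrite author's own statement) =====
-- stated objective: alternative
-- what changed: B replaces A's char-by-char scan with a current_gap accumulator and post-loop flush by a run-based scan (maximal equal-character runs, groupby-style) that emits one range per '-' run with no pending state or trailing flush.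
import Mathlib
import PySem

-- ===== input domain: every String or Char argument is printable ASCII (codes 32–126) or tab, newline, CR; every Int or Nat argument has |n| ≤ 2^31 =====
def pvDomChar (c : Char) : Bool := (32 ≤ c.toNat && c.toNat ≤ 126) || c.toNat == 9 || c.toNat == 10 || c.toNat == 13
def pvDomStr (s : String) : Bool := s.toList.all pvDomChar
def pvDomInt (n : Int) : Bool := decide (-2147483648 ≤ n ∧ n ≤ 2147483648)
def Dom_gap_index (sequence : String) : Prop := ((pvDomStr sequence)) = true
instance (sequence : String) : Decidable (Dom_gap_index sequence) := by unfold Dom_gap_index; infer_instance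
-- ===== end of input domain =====

-- B replaces A's char-by-char accumulator loop with a run-based scan; same O(n) cost, no pending-gap state.

-- ===== PORT A =====
-- the for-loop of A: state (gaps, current_gap), index i starting at 1
def gapLoop (i : Int) (l : List Char) (gaps : List (List Int)) (cur : List Int) :
    List (List Int) × List Int :=
  match l with
  | [] => (gaps, cur)
  | c :: cs =>
    if c == '-' then
      if cur.isEmpty then gapLoop (i + 1) cs gaps (cur ++ [i])
      else gapLoop (i + 1) cs gaps cur
    else
      if cur.isEmpty then gapLoop (i + 1) cs gaps cur
      else gapLoop (i + 1) cs (gaps ++ [cur ++ [i - 1]]) []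

def gap_index (sequence : String) : List (List Int) :=
  let st := gapLoop 1 sequence.toList [] []
  if st.2.isEmpty then st.1
  else st.1 ++ [st.2 ++ [(sequence.toList.length : Int)]]

-- ===== PORT B =====
-- inner while of B: length of the maximal leading run of c, and the remainder
def takeRun (c : Char) : List Char → Nat × List Char
  | [] => (0, [])
  | d :: ds => if d == c then ((takeRun c ds).1 + 1, (takeRun c ds).2) else (0, d :: ds)

theorem takeRun_len (c : Char) (l : List Char) : (takeRun c l).2.length ≤ l.length := by
  induction l with
  | nil => simp [takeRun]
  | cons d ds ih => simp only [takeRun]; split <;> simp <;> omega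

-- outer while of B: pos chars consumed so far; one step per run
def gapRuns (pos : Int) (l : List Char) : List (List Int) :=
  match l with
  | [] => []
  | c :: cs =>
    let r := takeRun c cs
    let len : Int := (r.1 : Int) + 1
    let tail := gapRuns (pos + len) r.2
    if c == '-' then [pos + 1, pos + len] :: tail else tail
termination_by l.length
decreasing_by have := takeRun_len c cs; simpa using Nat.lt_succ_of_le this

def gap_index_alt (sequence : String) : List (List Int) :=
  gapRuns 0 sequence.toList

-- ===== PRECONDITION & SPEC =====
def Spec_gap_index (sequence : String) (out : List (List Int)) : Prop := out = gap_index_alt sequence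
instance (sequence : String) (out : List (List Int)) : Decidable (Spec_gap_index sequence out) := by unfold Spec_gap_index; infer_instance

-- ===== CLAIM (what is proved, stated in full; the proofs are below) =====
def Claim_equal_gap_index : Prop := ∀ (sequence : String), Dom_gap_index sequence → Spec_gap_index sequence (gap_index sequence)

-- ===== LEMMAS AND PROOFS =====

-- A's end-of-loop flush, as a function of the final state and the total length N
def finishA (N : Int) (st : List (List Int) × List Int) : List (List Int) :=
  if st.2.isEmpty then st.1 else st.1 ++ [st.2 ++ [N]]

-- skipping a single non-dash char commutes with the run decomposition
theorem gapRuns_cons_ne (c : Char) (cs : List Char) (pos : Int) (h : (c == '-') = false) :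
    gapRuns pos (c :: cs) = gapRuns (pos + 1) cs := by
  cases cs with
  | nil => simp [gapRuns, takeRun, h]
  | cons d ds =>
    by_cases hd : (d == c) = true
    · have hdc : d = c := by simpa using hd
      have hd' : (d == '-') = false := by subst hdc; exact h
      simp only [gapRuns, takeRun, hd, h, hd', if_false]
      subst hdc
      have : pos + (((takeRun d ds).1 : Int) + 1 + 1) = pos + 1 + (((takeRun d ds).1 : Int) + 1) := by ring
      push_cast
      rw [show pos + (((takeRun d ds).1 : Int) + 1 + 1) = pos + 1 + (((takeRun d ds).1 : Int) + 1) by ring]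
    · have hd' : (d == c) = false := by simpa using hd
      simp [gapRuns, takeRun, hd', h]

theorem gapLoop_runs (l : List Char) :
    (∀ (pos : Int) (gaps : List (List Int)),
        finishA (pos + l.length) (gapLoop (pos + 1) l gaps []) = gaps ++ gapRuns pos l)
  ∧ (∀ (pos : Int) (gaps : List (List Int)) (s : Int),
        finishA (pos + l.length) (gapLoop (pos + 1) l gaps [s]) =
          gaps ++ ([s, pos + ((takeRun '-' l).1 : Int)] ::
                   gapRuns (pos + ((takeRun '-' l).1 : Int)) (takeRun '-' l).2)) := by
  induction l with
  | nil =>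
    constructor
    · intro pos gaps; simp [gapLoop, finishA, gapRuns]
    · intro pos gaps s; simp [gapLoop, finishA, takeRun, gapRuns]
  | cons c cs ih =>
    constructor
    · intro pos gaps
      by_cases hc : (c == '-') = true
      · have hc' : c = '-' := by simpa using hc
        simp only [gapLoop, hc, if_true, List.isEmpty_nil, List.nil_append]
        have h2 := ih.2 (pos + 1) gaps (pos + 1)
        rw [show pos + 1 + 1 = pos + 1 + 1 by rfl]
        have hlen : pos + ((c :: cs).length : Int) = (pos + 1) + (cs.length : Int) := by
          simp; ring
        rw [hlen, h2]
        subst hc'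
        simp only [gapRuns, takeRun, beq_self_eq_true, if_true]
        congr 2 <;> push_cast <;> ring_nf
      · have hc' : (c == '-') = false := by simpa using hc
        simp only [gapLoop, hc', Bool.false_eq_true, if_false, List.isEmpty_nil, if_true]
        have h1 := ih.1 (pos + 1) gaps
        have hlen : pos + ((c :: cs).length : Int) = (pos + 1) + (cs.length : Int) := by
          simp; ring
        rw [hlen, h1, gapRuns_cons_ne c cs pos hc']
    · intro pos gaps s
      by_cases hc : (c == '-') = true
      · have hc' : c = '-' := by simpa using hc
        simp only [gapLoop, hc, if_true]
        have hne : ([s] : List Int).isEmpty = false := by simp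
        rw [hne]
        simp only [if_false, Bool.false_eq_true]
        have h2 := ih.2 (pos + 1) gaps s
        have hlen : pos + ((c :: cs).length : Int) = (pos + 1) + (cs.length : Int) := by
          simp; ring
        rw [hlen, h2]
        subst hc'
        simp only [takeRun, beq_self_eq_true, if_true]
        congr 3 <;> push_cast <;> ring_nf
      · have hc' : (c == '-') = false := by simpa using hc
        simp only [gapLoop, hc', if_false]
        have hne : ([s] : List Int).isEmpty = false := by simp
        rw [hne]
        simp only [Bool.false_eq_true, if_false]
        have h1 := ih.1 (pos + 1) (gaps ++ [[s] ++ [pos + 1 - 1]])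
        have hlen : pos + ((c :: cs).length : Int) = (pos + 1) + (cs.length : Int) := by
          simp; ring
        rw [hlen, h1]
        simp only [takeRun, hc', Bool.false_eq_true, if_false, Nat.cast_zero, add_zero]
        rw [gapRuns_cons_ne c cs pos hc']
        simp

-- ===== VERDICT (by name: the statement is the Claim_ definition above) =====
theorem gap_index_spec : Claim_equal_gap_index := by
  intro sequence _
  unfold Spec_gap_index gap_index gap_index_alt
  have h := (gapLoop_runs sequence.toList).1 0 []
  simp only [zero_add] at h
  simpa [finishA] using h
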